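-- pv_equiv track=rewrite | github.com/giridharan1129/python-practice-solutions | substr1distchar.py | distinctSubstring
-- ===== SOURCE A (Python) =====
-- def distinctSubstring(str):
--     ans=0
--     subs=0
--     pre=''
--     for i in str:
--         if i==pre:
--             subs+=1
--         else:
--             subs=1
--             pre=i
--         ans+=subs
--     return ans
-- ===== SOURCE B (Python) =====
-- def distinctSubstring(str):
--     total = 0
--     n = len(str)
--     i = 0
--     while i < n:
--         j = i + 1
--         while j < n and str[j] == str[i]:
--             j += 1
--         L = j - i
--         total += L * (L + 1) // 2
--         i = j
--     return total
-- ===== Notes on version B (the rewrite author's own statement) =====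
-- stated objective: alternative
-- what changed: B scans each maximal run of equal characters with an inner while loop and adds the triangular closed form L*(L+1)//2 per run, instead of A's per-character running subs counter.
import Mathlib
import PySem

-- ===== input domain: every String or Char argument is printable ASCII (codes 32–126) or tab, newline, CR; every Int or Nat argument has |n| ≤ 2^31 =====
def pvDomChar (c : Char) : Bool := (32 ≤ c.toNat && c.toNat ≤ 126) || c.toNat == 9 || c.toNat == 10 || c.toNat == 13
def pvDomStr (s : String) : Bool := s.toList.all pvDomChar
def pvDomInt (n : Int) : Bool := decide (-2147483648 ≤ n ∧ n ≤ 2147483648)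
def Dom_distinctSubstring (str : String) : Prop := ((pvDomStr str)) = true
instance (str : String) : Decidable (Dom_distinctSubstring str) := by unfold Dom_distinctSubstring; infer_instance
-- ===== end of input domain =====

-- B replaces A's per-character running `subs` counter by scanning each maximal run of
-- equal characters and adding the triangular closed form L*(L+1)//2 per run (alternative decomposition, same cost).

-- ===== PORT A =====
-- the for loop over the string's characters, state (ans, subs, pre); pre = none models Python's initial pre = ''
def pvLoopA : List Char → Int → Int → Option Char → Int
  | [], ans, _, _ => ans
  | i :: rest, ans, subs, pre =>
      if pre = some i then pvLoopA rest (ans + (subs + 1)) (subs + 1) pre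
      else pvLoopA rest (ans + 1) 1 (some i)

def distinctSubstring (str : String) : Int := pvLoopA str.toList 0 0 none

-- ===== PORT B =====
-- the inner while loop of Source B: number of further characters equal to c at the front of the suffix
def pvLeadRun (c : Char) : List Char → Nat
  | [] => 0
  | x :: rest => if x = c then pvLeadRun c rest + 1 else 0

-- the outer while loop of Source B over the remaining suffix; fuel = length of the whole list makes
-- the recursion structural (the loop consumes at least one character per iteration)
def pvAltGoF : Nat → List Char → Int
  | _, [] => 0
  | 0, _ :: _ => 0
  | fuel + 1, c :: rest =>
      PySem.Int.floordiv ((1 + (pvLeadRun c rest : Int)) * ((1 + (pvLeadRun c rest : Int)) + 1)) 2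
        + pvAltGoF fuel (rest.drop (pvLeadRun c rest))

def distinctSubstring_alt (str : String) : Int := pvAltGoF str.toList.length str.toList

-- ===== PRECONDITION & SPEC =====
def Spec_distinctSubstring (str : String) (out : Int) : Prop := out = distinctSubstring_alt str
instance (str : String) (out : Int) : Decidable (Spec_distinctSubstring str out) := by unfold Spec_distinctSubstring; infer_instance

-- ===== CLAIM (what is proved, stated in full; the proofs are below) =====
def Claim_equal_distinctSubstring : Prop := ∀ (str : String), Dom_distinctSubstring str → Spec_distinctSubstring str (distinctSubstring str)


-- ===== LEMMAS AND PROOFS =====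

-- contribution of processing a run of k more matching characters starting with counter s:
-- (s+1) + (s+2) + ... + (s+k)
def pvG (s : Int) : Nat → Int
  | 0 => 0
  | k + 1 => (s + 1) + pvG (s + 1) k

lemma pvG_closed (s : Int) (k : Nat) : 2 * pvG s k = k * (2 * s + k + 1) := by
  induction k generalizing s with
  | zero => simp [pvG]
  | succ n ih =>
      have h := ih (s + 1)
      simp only [pvG]
      push_cast
      push_cast at h
      linear_combination h

lemma pvAltGoF_cons (f : Nat) (c : Char) (rest : List Char) :
    pvAltGoF (f + 1) (c :: rest) =
      (1 + (pvLeadRun c rest : Int)) * ((1 + (pvLeadRun c rest : Int)) + 1) / 2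
        + pvAltGoF f (rest.drop (pvLeadRun c rest)) := by
  show PySem.Int.floordiv _ 2 + _ = _
  rw [PySem.Int.floordiv_eq_ediv_of_pos (by norm_num)]

-- the fuel never matters as long as it is at least the list's length
lemma pvAltGoF_irrel (f : Nat) : ∀ (g : Nat) (l : List Char),
    l.length ≤ f → l.length ≤ g → pvAltGoF f l = pvAltGoF g l := by
  induction f with
  | zero =>
      intro g l hf _
      have : l = [] := List.eq_nil_of_length_eq_zero (Nat.le_zero.mp hf)
      subst this
      cases g <;> rfl
  | succ f ih =>
      intro g l hf hg
      cases l with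
      | nil => cases g <;> rfl
      | cons c rest =>
          cases g with
          | zero => exact absurd hg (by simp)
          | succ g' =>
              rw [pvAltGoF_cons, pvAltGoF_cons]
              have hd : (rest.drop (pvLeadRun c rest)).length ≤ rest.length := by
                simp [List.length_drop]
              have hf' : rest.length ≤ f := by simpa using hf
              have hg' : rest.length ≤ g' := by simpa using hg
              rw [ih g' (rest.drop (pvLeadRun c rest)) (hd.trans hf') (hd.trans hg')]

-- the triangular closed form equals 1 plus the run contribution with fresh counter 1
lemma pv_triangular (n : Nat) :
    (1 + (n : Int)) * ((1 + (n : Int)) + 1) / 2 = 1 + pvG 1 n := by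
  have h2 := pvG_closed 1 n
  have hm : (1 + (n : Int)) * ((1 + (n : Int)) + 1) = 2 * (1 + pvG 1 n) := by nlinarith [h2]
  omega

-- processing the rest of the string with state (ans, s, some c): first consume the run of c's,
-- then the remainder behaves like a fresh outer-loop iteration of B
lemma pvLoopA_run (rest : List Char) (c : Char) (ans s : Int) :
    pvLoopA rest ans s (some c) =
      ans + pvG s (pvLeadRun c rest)
        + pvAltGoF (rest.drop (pvLeadRun c rest)).length (rest.drop (pvLeadRun c rest)) := by
  induction rest generalizing c ans s with
  | nil => simp [pvLoopA, pvLeadRun, pvG, pvAltGoF]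
  | cons x r ih =>
      by_cases hx : x = c
      · subst hx
        simp only [pvLoopA, pvLeadRun, if_true]
        rw [ih x (ans + (s + 1)) (s + 1), List.drop_succ_cons]
        simp only [pvG]
        try ring
      · simp only [pvLoopA, pvLeadRun, Option.some.injEq, if_neg (Ne.symm hx), if_neg hx,
          List.drop_zero, pvG, add_zero]
        rw [ih x (ans + 1) 1]
        rw [show (x :: r).length = r.length + 1 from by simp]
        rw [pvAltGoF_cons, pv_triangular]
        have hd : (r.drop (pvLeadRun x r)).length ≤ r.length := by
          simp [List.length_drop]
        rw [pvAltGoF_irrel r.length (r.drop (pvLeadRun x r)).length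
              (r.drop (pvLeadRun x r)) hd le_rfl]
        ring

-- ===== VERDICT (by name: the statement is the Claim_ definition above) =====
theorem distinctSubstring_spec : Claim_equal_distinctSubstring := by
  intro str _
  unfold Spec_distinctSubstring distinctSubstring distinctSubstring_alt
  cases h : str.toList with
  | nil => simp [pvLoopA, pvAltGoF]
  | cons c rest =>
      simp only [pvLoopA, reduceCtorEq, if_false, zero_add]
      rw [pvLoopA_run rest c 1 1]
      rw [show (c :: rest).length = rest.length + 1 from by simp]
      rw [pvAltGoF_cons, pv_triangular]
      have hd : (rest.drop (pvLeadRun c rest)).length ≤ rest.length := by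
        simp [List.length_drop]
      rw [pvAltGoF_irrel rest.length (rest.drop (pvLeadRun c rest)).length
            (rest.drop (pvLeadRun c rest)) hd le_rfl]
      try ring
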